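-- pv_equiv track=rewrite | github.com/danielrezende3/competitive-programming-solutions | sol-cses/Introductory Problems/Two_Knights.py | array_of_possibilities
-- ===== SOURCE A (Python) =====
-- def zeros_matrix(n):
--     return [[0 for _ in range(n)] for _ in range(n)]
--
-- def array_of_possibilities(n):
--     array = zeros_matrix(n)
--
--     for i in range(0, n):
--         for j in range(0, n):
--             if i + 2 < n and j + 1 < n:
--                 array[i + 2][j + 1] += 1
--             if i + 2 < n and j - 1 >= 0:
--                 array[i + 2][j - 1] += 1
--             if i - 2 >= 0 and j - 1 >= 0:
--                 array[i - 2][j - 1] += 1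
--             if i - 2 >= 0 and j + 1 < n:
--                 array[i - 2][j + 1] += 1
--             # one line and two columns
--             if i + 1 < n and j + 2 < n:
--                 array[i + 1][j + 2] += 1
--             if i + 1 < n and j - 2 >= 0:
--                 array[i + 1][j - 2] += 1
--             if i - 1 >= 0 and j - 2 >= 0:
--                 array[i - 1][j - 2] += 1
--             if i - 1 >= 0 and j + 2 < n:
--                 array[i - 1][j + 2] += 1
--
--     return array
-- ===== SOURCE B (Python) =====
-- # Gather formulation: each cell directly counts the knight offsets that land on the board
-- # (knight moves are symmetric, so inbound count = outbound count).
-- OFFSETS = [(-2, -1), (-2, 1), (2, 1), (2, -1), (-1, -2), (-1, 2), (1, 2), (1, -2)]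
--
-- def array_of_possibilities(n):
--     return [[sum(1 if 0 <= i + di < n and 0 <= j + dj < n else 0 for di, dj in OFFSETS)
--              for j in range(n)]
--             for i in range(n)]
-- ===== Notes on version B (the rewrite author's own statement) =====
-- stated objective: simpler
-- what changed: Scatter-to-gather decomposition: instead of building a zero matrix and distributing increments from each source cell into its guarded knight neighbours, B builds each cell directly as the count of knight offsets that land on the board, using knight-move symmetry.
import Mathlib
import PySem

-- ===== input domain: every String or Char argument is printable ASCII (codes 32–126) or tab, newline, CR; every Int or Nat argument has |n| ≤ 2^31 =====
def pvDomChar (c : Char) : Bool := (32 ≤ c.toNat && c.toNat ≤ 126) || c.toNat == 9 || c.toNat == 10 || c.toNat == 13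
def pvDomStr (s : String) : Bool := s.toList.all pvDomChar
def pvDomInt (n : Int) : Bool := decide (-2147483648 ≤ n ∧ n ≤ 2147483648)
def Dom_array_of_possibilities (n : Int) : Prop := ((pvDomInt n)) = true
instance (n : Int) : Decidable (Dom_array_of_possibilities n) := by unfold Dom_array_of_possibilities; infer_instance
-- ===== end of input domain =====

-- B replaces A's scatter (distribute increments from each source cell into its guarded knight
-- neighbours of a mutable zero matrix) by a gather (each cell directly counts the knight
-- offsets that land on the board); same cost, simpler per-cell formula, same output.


-- ===== PORT A =====
-- zeros_matrix(n)
def pvZeros (n : Int) : List (List Int) :=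
  (PySem.List.pyRange 0 n 1).map (fun _ => (PySem.List.pyRange 0 n 1).map (fun _ => (0 : Int)))

-- array[r][c] += 1; every call site guards 0 ≤ r < n and 0 ≤ c < n, so .toNat is exact here
def pvBump (m : List (List Int)) (r c : Int) : List (List Int) :=
  m.modify r.toNat (fun row => row.modify c.toNat (· + 1))

-- the body of A's double loop: the 8 guarded increments, in A's order
def pvStepA (n : Int) (m : List (List Int)) (i j : Int) : List (List Int) :=
  let m1 := if i + 2 < n ∧ j + 1 < n then pvBump m (i + 2) (j + 1) else m
  let m2 := if i + 2 < n ∧ j - 1 ≥ 0 then pvBump m1 (i + 2) (j - 1) else m1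
  let m3 := if i - 2 ≥ 0 ∧ j - 1 ≥ 0 then pvBump m2 (i - 2) (j - 1) else m2
  let m4 := if i - 2 ≥ 0 ∧ j + 1 < n then pvBump m3 (i - 2) (j + 1) else m3
  let m5 := if i + 1 < n ∧ j + 2 < n then pvBump m4 (i + 1) (j + 2) else m4
  let m6 := if i + 1 < n ∧ j - 2 ≥ 0 then pvBump m5 (i + 1) (j - 2) else m5
  let m7 := if i - 1 ≥ 0 ∧ j - 2 ≥ 0 then pvBump m6 (i - 1) (j - 2) else m6
  let m8 := if i - 1 ≥ 0 ∧ j + 2 < n then pvBump m7 (i - 1) (j + 2) else m7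
  m8

def array_of_possibilities (n : Int) : List (List Int) :=
  (PySem.List.pyRange 0 n 1).foldl
    (fun m i => (PySem.List.pyRange 0 n 1).foldl (fun m j => pvStepA n m i j) m)
    (pvZeros n)

-- ===== PORT B =====
def pvOffsets : List (Int × Int) :=
  [(-2, -1), (-2, 1), (2, 1), (2, -1), (-1, -2), (-1, 2), (1, 2), (1, -2)]

def pvCount (n i j : Int) : Int :=
  (pvOffsets.map (fun d =>
    if 0 ≤ i + d.1 ∧ i + d.1 < n ∧ 0 ≤ j + d.2 ∧ j + d.2 < n then (1 : Int) else 0)).sum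

def array_of_possibilities_alt (n : Int) : List (List Int) :=
  (PySem.List.pyRange 0 n 1).map (fun i =>
    (PySem.List.pyRange 0 n 1).map (fun j => pvCount n i j))

-- ===== PRECONDITION & SPEC =====
def Spec_array_of_possibilities (n : Int) (out : List (List Int)) : Prop := out = array_of_possibilities_alt n
instance (n : Int) (out : List (List Int)) : Decidable (Spec_array_of_possibilities n out) := by unfold Spec_array_of_possibilities; infer_instance

-- ===== CLAIM (what is proved, stated in full; the proofs are below) =====
def Claim_equal_array_of_possibilities : Prop := ∀ (n : Int), Dom_array_of_possibilities n → Spec_array_of_possibilities n (array_of_possibilities n)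

-- ===== LEMMAS AND PROOFS =====

-- a matrix given by a function on Nat indices
def pvNatMk (N : Nat) (f : Nat → Nat → Int) : List (List Int) :=
  (List.range N).map (fun r => (List.range N).map (fun c => f r c))

theorem pvNatMk_congr (N : Nat) (f g : Nat → Nat → Int)
    (h : ∀ r, r < N → ∀ c, c < N → f r c = g r c) : pvNatMk N f = pvNatMk N g := by
  unfold pvNatMk
  refine List.map_congr_left (fun r hr => ?_)
  refine List.map_congr_left (fun c hc => ?_)
  exact h r (List.mem_range.mp hr) c (List.mem_range.mp hc)

theorem pvZeros_eq (n : Int) : pvZeros n = pvNatMk n.toNat (fun _ _ => 0) := by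
  simp [pvZeros, pvNatMk, PySem.List.pyRange_one, Function.comp_def]

theorem pvAlt_eq (n : Int) :
    array_of_possibilities_alt n
      = pvNatMk n.toNat (fun r c => pvCount n (r : Int) (c : Int)) := by
  simp [array_of_possibilities_alt, pvNatMk, PySem.List.pyRange_one]

theorem pvBump_mk (N : Nat) (f : Nat → Nat → Int) (r c : Int)
    (hr0 : 0 ≤ r) (_hrN : r < (N : Int)) (hc0 : 0 ≤ c) (_hcN : c < (N : Int)) :
    pvBump (pvNatMk N f) r c
      = pvNatMk N (fun r' c' =>
          if (r' : Int) = r ∧ (c' : Int) = c then f r' c' + 1 else f r' c') := by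
  unfold pvBump pvNatMk
  apply List.ext_getElem
  · simp
  · intro k h1 h2
    rw [List.getElem_modify]
    simp only [List.getElem_map, List.getElem_range]
    simp only [List.length_modify, List.length_map, List.length_range] at h1
    by_cases hk : r.toNat = k
    · rw [if_pos hk]
      apply List.ext_getElem
      · simp
      · intro l h3 h4
        rw [List.getElem_modify]
        simp only [List.getElem_map, List.getElem_range]
        simp only [List.length_modify, List.length_map, List.length_range] at h3
        by_cases hl : c.toNat = l
        · rw [if_pos hl, if_pos (by omega)]
        · rw [if_neg hl, if_neg (by omega)]
    · rw [if_neg hk]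
      refine List.map_congr_left (fun l hl => ?_)
      rw [if_neg (by omega)]

-- one guarded increment on a function-matrix
theorem pvCondBump (N : Nat) (f : Nat → Nat → Int) (P : Prop) [Decidable P] (r0 c0 : Int)
    (h : P → 0 ≤ r0 ∧ r0 < (N : Int) ∧ 0 ≤ c0 ∧ c0 < (N : Int)) :
    (if P then pvBump (pvNatMk N f) r0 c0 else pvNatMk N f)
      = pvNatMk N (fun r c =>
          f r c + (if P ∧ (r : Int) = r0 ∧ (c : Int) = c0 then 1 else 0)) := by
  by_cases hP : P
  · rw [if_pos hP, pvBump_mk N f r0 c0 (h hP).1 (h hP).2.1 (h hP).2.2.1 (h hP).2.2.2]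
    refine pvNatMk_congr N _ _ (fun r hr c hc => ?_)
    simp only [hP, true_and]
    split_ifs <;> omega
  · rw [if_neg hP]
    refine (pvNatMk_congr N _ _ (fun r hr c hc => ?_)).symm
    simp [hP]

-- the contribution of source (i, j) to cell (r, c): one term per guarded increment of A,
-- each condition rewritten into the "j = … ∧ …" shape consumed by the point-sum lemma
def pvContrib (n i j : Int) (r c : Nat) : Int :=
    (if j = (c : Int) - 1 ∧ (i = (r : Int) - 2 ∧ ((r : Int) < n ∧ (c : Int) < n)) then (1:Int) else 0)
  + (if j = (c : Int) + 1 ∧ (i = (r : Int) - 2 ∧ (r : Int) < n) then (1:Int) else 0)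
  + (if j = (c : Int) + 1 ∧ (i = (r : Int) + 2) then (1:Int) else 0)
  + (if j = (c : Int) - 1 ∧ (i = (r : Int) + 2 ∧ (c : Int) < n) then (1:Int) else 0)
  + (if j = (c : Int) - 2 ∧ (i = (r : Int) - 1 ∧ ((r : Int) < n ∧ (c : Int) < n)) then (1:Int) else 0)
  + (if j = (c : Int) + 2 ∧ (i = (r : Int) - 1 ∧ (r : Int) < n) then (1:Int) else 0)
  + (if j = (c : Int) + 2 ∧ (i = (r : Int) + 1) then (1:Int) else 0)
  + (if j = (c : Int) - 2 ∧ (i = (r : Int) + 1 ∧ (c : Int) < n) then (1:Int) else 0)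

theorem pvStepA_mk (n : Int) (f : Nat → Nat → Int) (i j : Int)
    (hi0 : 0 ≤ i) (hin : i < n) (hj0 : 0 ≤ j) (hjn : j < n) :
    pvStepA n (pvNatMk n.toNat f) i j
      = pvNatMk n.toNat (fun r c => f r c + pvContrib n i j r c) := by
  unfold pvStepA
  dsimp only
  rw [pvCondBump _ _ _ _ _ (fun h => by omega)]
  rw [pvCondBump _ _ _ _ _ (fun h => by omega)]
  rw [pvCondBump _ _ _ _ _ (fun h => by omega)]
  rw [pvCondBump _ _ _ _ _ (fun h => by omega)]
  rw [pvCondBump _ _ _ _ _ (fun h => by omega)]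
  rw [pvCondBump _ _ _ _ _ (fun h => by omega)]
  rw [pvCondBump _ _ _ _ _ (fun h => by omega)]
  rw [pvCondBump _ _ _ _ _ (fun h => by omega)]
  refine pvNatMk_congr _ _ _ (fun r hr c hc => ?_)
  simp only [pvContrib]
  have e1 : (if (i + 2 < n ∧ j + 1 < n) ∧ (r : Int) = i + 2 ∧ (c : Int) = j + 1 then (1:Int) else 0)
      = (if j = (c : Int) - 1 ∧ (i = (r : Int) - 2 ∧ ((r : Int) < n ∧ (c : Int) < n)) then (1:Int) else 0) := by
    split_ifs <;> omega
  have e2 : (if (i + 2 < n ∧ j - 1 ≥ 0) ∧ (r : Int) = i + 2 ∧ (c : Int) = j - 1 then (1:Int) else 0)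
      = (if j = (c : Int) + 1 ∧ (i = (r : Int) - 2 ∧ (r : Int) < n) then (1:Int) else 0) := by
    split_ifs <;> omega
  have e3 : (if (i - 2 ≥ 0 ∧ j - 1 ≥ 0) ∧ (r : Int) = i - 2 ∧ (c : Int) = j - 1 then (1:Int) else 0)
      = (if j = (c : Int) + 1 ∧ (i = (r : Int) + 2) then (1:Int) else 0) := by
    split_ifs <;> omega
  have e4 : (if (i - 2 ≥ 0 ∧ j + 1 < n) ∧ (r : Int) = i - 2 ∧ (c : Int) = j + 1 then (1:Int) else 0)
      = (if j = (c : Int) - 1 ∧ (i = (r : Int) + 2 ∧ (c : Int) < n) then (1:Int) else 0) := by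
    split_ifs <;> omega
  have e5 : (if (i + 1 < n ∧ j + 2 < n) ∧ (r : Int) = i + 1 ∧ (c : Int) = j + 2 then (1:Int) else 0)
      = (if j = (c : Int) - 2 ∧ (i = (r : Int) - 1 ∧ ((r : Int) < n ∧ (c : Int) < n)) then (1:Int) else 0) := by
    split_ifs <;> omega
  have e6 : (if (i + 1 < n ∧ j - 2 ≥ 0) ∧ (r : Int) = i + 1 ∧ (c : Int) = j - 2 then (1:Int) else 0)
      = (if j = (c : Int) + 2 ∧ (i = (r : Int) - 1 ∧ (r : Int) < n) then (1:Int) else 0) := by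
    split_ifs <;> omega
  have e7 : (if (i - 1 ≥ 0 ∧ j - 2 ≥ 0) ∧ (r : Int) = i - 1 ∧ (c : Int) = j - 2 then (1:Int) else 0)
      = (if j = (c : Int) + 2 ∧ (i = (r : Int) + 1) then (1:Int) else 0) := by
    split_ifs <;> omega
  have e8 : (if (i - 1 ≥ 0 ∧ j + 2 < n) ∧ (r : Int) = i - 1 ∧ (c : Int) = j + 2 then (1:Int) else 0)
      = (if j = (c : Int) - 2 ∧ (i = (r : Int) + 1 ∧ (c : Int) < n) then (1:Int) else 0) := by
    split_ifs <;> omega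
  rw [e1, e2, e3, e4, e5, e6, e7, e8]
  ring

-- the inner loop 'for j in range(0, n)'
theorem pvInner (n i : Int) (hi0 : 0 ≤ i) (hin : i < n) (js : List Int)
    (hjs : ∀ j ∈ js, 0 ≤ j ∧ j < n) (f : Nat → Nat → Int) :
    js.foldl (fun m j => pvStepA n m i j) (pvNatMk n.toNat f)
      = pvNatMk n.toNat (fun r c => f r c + (js.map (fun j => pvContrib n i j r c)).sum) := by
  induction js generalizing f with
  | nil => simp
  | cons j js ih =>
    simp only [List.foldl_cons]
    rw [pvStepA_mk n f i j hi0 hin (hjs j (List.mem_cons_self)).1 (hjs j (List.mem_cons_self)).2]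
    rw [ih (fun x hx => hjs x (List.mem_cons_of_mem j hx))]
    refine pvNatMk_congr _ _ _ (fun r hr c hc => ?_)
    simp only [List.map_cons, List.sum_cons]
    ring

-- the outer loop 'for i in range(0, n)'
theorem pvOuter (n : Int) (is : List Int) (his : ∀ i ∈ is, 0 ≤ i ∧ i < n) (f : Nat → Nat → Int) :
    is.foldl (fun m i => (PySem.List.pyRange 0 n 1).foldl (fun m j => pvStepA n m i j) m)
        (pvNatMk n.toNat f)
      = pvNatMk n.toNat (fun r c => f r c +
          (is.map (fun i =>
            ((PySem.List.pyRange 0 n 1).map (fun j => pvContrib n i j r c)).sum)).sum) := by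
  induction is generalizing f with
  | nil => simp
  | cons i is ih =>
    simp only [List.foldl_cons]
    rw [pvInner n i (his i List.mem_cons_self).1 (his i List.mem_cons_self).2
          (PySem.List.pyRange 0 n 1)
          (fun j hj => PySem.List.mem_pyRange_one.mp hj) f]
    rw [ih (fun x hx => his x (List.mem_cons_of_mem i hx))]
    refine pvNatMk_congr _ _ _ (fun r hr c hc => ?_)
    simp only [List.map_cons, List.sum_cons]
    ring

-- sum of a point indicator over range N
theorem pvSumRangeInd (N : Nat) (a : Int) :
    ((List.range N).map (fun (k : Nat) => if (k : Int) = a then (1:Int) else 0)).sum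
      = if 0 ≤ a ∧ a < (N : Int) then 1 else 0 := by
  induction N with
  | zero => simp
  | succ m ih =>
    rw [List.range_succ, List.map_append, List.sum_append, ih]
    simp only [List.map_cons, List.map_nil, List.sum_cons, List.sum_nil]
    split_ifs <;> omega

-- sum of a point indicator over range(0, n)
theorem pvSumPoint (n a : Int) (P : Prop) [Decidable P] :
    ((PySem.List.pyRange 0 n 1).map (fun j => if j = a ∧ P then (1:Int) else 0)).sum
      = if (0 ≤ a ∧ a < n) ∧ P then 1 else 0 := by
  by_cases hP : P
  · simp only [hP, and_true, PySem.List.pyRange_one, List.map_map]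
    have : ((fun j => if j = a then (1:Int) else 0) ∘ fun k : Nat => (0:Int) + ↑k)
        = (fun k : Nat => if (k : Int) = a then (1:Int) else 0) := by
      funext k; simp
    rw [this, pvSumRangeInd]
    split_ifs <;> omega
  · simp [hP]

-- distribute a sum of eight termwise summands
theorem pvSumMap8 (l : List Int) (f1 f2 f3 f4 f5 f6 f7 f8 : Int → Int) :
    (l.map (fun x => f1 x + f2 x + f3 x + f4 x + f5 x + f6 x + f7 x + f8 x)).sum
      = (l.map f1).sum + (l.map f2).sum + (l.map f3).sum + (l.map f4).sum
        + (l.map f5).sum + (l.map f6).sum + (l.map f7).sum + (l.map f8).sum := by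
  induction l with
  | nil => simp
  | cons x l ih =>
    simp only [List.map_cons, List.sum_cons, ih]
    ring

-- pvContrib summed over j, as a function of i (point-sum in j, conditions re-sorted to "i = …")
def pvContribI (n i : Int) (r c : Nat) : Int :=
    (if i = (r : Int) - 2 ∧ (0 ≤ (c : Int) - 1 ∧ (c : Int) - 1 < n ∧ (r : Int) < n ∧ (c : Int) < n) then (1:Int) else 0)
  + (if i = (r : Int) - 2 ∧ (0 ≤ (c : Int) + 1 ∧ (c : Int) + 1 < n ∧ (r : Int) < n) then (1:Int) else 0)
  + (if i = (r : Int) + 2 ∧ (0 ≤ (c : Int) + 1 ∧ (c : Int) + 1 < n) then (1:Int) else 0)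
  + (if i = (r : Int) + 2 ∧ (0 ≤ (c : Int) - 1 ∧ (c : Int) - 1 < n ∧ (c : Int) < n) then (1:Int) else 0)
  + (if i = (r : Int) - 1 ∧ (0 ≤ (c : Int) - 2 ∧ (c : Int) - 2 < n ∧ (r : Int) < n ∧ (c : Int) < n) then (1:Int) else 0)
  + (if i = (r : Int) - 1 ∧ (0 ≤ (c : Int) + 2 ∧ (c : Int) + 2 < n ∧ (r : Int) < n) then (1:Int) else 0)
  + (if i = (r : Int) + 1 ∧ (0 ≤ (c : Int) + 2 ∧ (c : Int) + 2 < n) then (1:Int) else 0)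
  + (if i = (r : Int) + 1 ∧ (0 ≤ (c : Int) - 2 ∧ (c : Int) - 2 < n ∧ (c : Int) < n) then (1:Int) else 0)

theorem pvSumJ (n i : Int) (r c : Nat) :
    ((PySem.List.pyRange 0 n 1).map (fun j => pvContrib n i j r c)).sum = pvContribI n i r c := by
  simp only [pvContrib]
  rw [pvSumMap8]
  rw [pvSumPoint, pvSumPoint, pvSumPoint, pvSumPoint, pvSumPoint, pvSumPoint, pvSumPoint, pvSumPoint]
  simp only [pvContribI]
  congr 1
  · congr 1
    · congr 1
      · congr 1
        · congr 1
          · congr 1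
            · congr 1 <;> (split_ifs <;> omega)
            · split_ifs <;> omega
          · split_ifs <;> omega
        · split_ifs <;> omega
      · split_ifs <;> omega
    · split_ifs <;> omega
  · split_ifs <;> omega

-- the full double sum, evaluated at an on-board cell, equals B's per-cell count
theorem pvCell (n : Int) (r c : Nat) (hr : (r : Int) < n) (hc : (c : Int) < n) :
    ((PySem.List.pyRange 0 n 1).map (fun i =>
        ((PySem.List.pyRange 0 n 1).map (fun j => pvContrib n i j r c)).sum)).sum
      = pvCount n (r : Int) (c : Int) := by
  have hfe : (fun i => ((PySem.List.pyRange 0 n 1).map (fun j => pvContrib n i j r c)).sum)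
      = (fun i => pvContribI n i r c) := funext (fun i => pvSumJ n i r c)
  rw [hfe]
  simp only [pvContribI]
  rw [pvSumMap8]
  rw [pvSumPoint, pvSumPoint, pvSumPoint, pvSumPoint, pvSumPoint, pvSumPoint, pvSumPoint, pvSumPoint]
  simp only [pvCount, pvOffsets, List.map_cons, List.map_nil, List.sum_cons, List.sum_nil]
  have b1 : (if ((0:Int) ≤ (r : Int) - 2 ∧ (r : Int) - 2 < n) ∧ (0 ≤ (c : Int) - 1 ∧ (c : Int) - 1 < n ∧ (r : Int) < n ∧ (c : Int) < n) then (1:Int) else 0)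
      = (if 0 ≤ (r : Int) + -2 ∧ (r : Int) + -2 < n ∧ 0 ≤ (c : Int) + -1 ∧ (c : Int) + -1 < n then (1:Int) else 0) := by
    split_ifs <;> omega
  have b2 : (if ((0:Int) ≤ (r : Int) - 2 ∧ (r : Int) - 2 < n) ∧ (0 ≤ (c : Int) + 1 ∧ (c : Int) + 1 < n ∧ (r : Int) < n) then (1:Int) else 0)
      = (if 0 ≤ (r : Int) + -2 ∧ (r : Int) + -2 < n ∧ 0 ≤ (c : Int) + 1 ∧ (c : Int) + 1 < n then (1:Int) else 0) := by
    split_ifs <;> omega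
  have b3 : (if ((0:Int) ≤ (r : Int) + 2 ∧ (r : Int) + 2 < n) ∧ (0 ≤ (c : Int) + 1 ∧ (c : Int) + 1 < n) then (1:Int) else 0)
      = (if 0 ≤ (r : Int) + 2 ∧ (r : Int) + 2 < n ∧ 0 ≤ (c : Int) + 1 ∧ (c : Int) + 1 < n then (1:Int) else 0) := by
    split_ifs <;> omega
  have b4 : (if ((0:Int) ≤ (r : Int) + 2 ∧ (r : Int) + 2 < n) ∧ (0 ≤ (c : Int) - 1 ∧ (c : Int) - 1 < n ∧ (c : Int) < n) then (1:Int) else 0)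
      = (if 0 ≤ (r : Int) + 2 ∧ (r : Int) + 2 < n ∧ 0 ≤ (c : Int) + -1 ∧ (c : Int) + -1 < n then (1:Int) else 0) := by
    split_ifs <;> omega
  have b5 : (if ((0:Int) ≤ (r : Int) - 1 ∧ (r : Int) - 1 < n) ∧ (0 ≤ (c : Int) - 2 ∧ (c : Int) - 2 < n ∧ (r : Int) < n ∧ (c : Int) < n) then (1:Int) else 0)
      = (if 0 ≤ (r : Int) + -1 ∧ (r : Int) + -1 < n ∧ 0 ≤ (c : Int) + -2 ∧ (c : Int) + -2 < n then (1:Int) else 0) := by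
    split_ifs <;> omega
  have b6 : (if ((0:Int) ≤ (r : Int) - 1 ∧ (r : Int) - 1 < n) ∧ (0 ≤ (c : Int) + 2 ∧ (c : Int) + 2 < n ∧ (r : Int) < n) then (1:Int) else 0)
      = (if 0 ≤ (r : Int) + -1 ∧ (r : Int) + -1 < n ∧ 0 ≤ (c : Int) + 2 ∧ (c : Int) + 2 < n then (1:Int) else 0) := by
    split_ifs <;> omega
  have b7 : (if ((0:Int) ≤ (r : Int) + 1 ∧ (r : Int) + 1 < n) ∧ (0 ≤ (c : Int) + 2 ∧ (c : Int) + 2 < n) then (1:Int) else 0)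
      = (if 0 ≤ (r : Int) + 1 ∧ (r : Int) + 1 < n ∧ 0 ≤ (c : Int) + 2 ∧ (c : Int) + 2 < n then (1:Int) else 0) := by
    split_ifs <;> omega
  have b8 : (if ((0:Int) ≤ (r : Int) + 1 ∧ (r : Int) + 1 < n) ∧ (0 ≤ (c : Int) - 2 ∧ (c : Int) - 2 < n ∧ (c : Int) < n) then (1:Int) else 0)
      = (if 0 ≤ (r : Int) + 1 ∧ (r : Int) + 1 < n ∧ 0 ≤ (c : Int) + -2 ∧ (c : Int) + -2 < n then (1:Int) else 0) := by
    split_ifs <;> omega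
  rw [b1, b2, b3, b4, b5, b6, b7, b8]
  ring

-- ===== VERDICT (by name: the statement is the Claim_ definition above) =====
theorem array_of_possibilities_spec : Claim_equal_array_of_possibilities := by
  intro n _
  unfold Spec_array_of_possibilities array_of_possibilities
  rw [pvZeros_eq, pvAlt_eq]
  rw [pvOuter n (PySem.List.pyRange 0 n 1)
        (fun i hi => PySem.List.mem_pyRange_one.mp hi) (fun _ _ => 0)]
  refine pvNatMk_congr _ _ _ (fun r hr c hc => ?_)
  rw [zero_add]
  exact pvCell n r c (by omega) (by omega)
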